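-- pv_equiv track=rewrite | github.com/ThiagoDonato/Cominatorial_Research | backend/app.py | n3_fitness
-- ===== SOURCE A (Python) =====
-- from collections import defaultdict
--
-- def count_elements_to_right(l1, l2):
--     l1_set = set(l1)
--     right_count = {x: 0 for x in l1_set}
--     count = 0
--
--     # Traverse l2 from right to left
--     for i in reversed(range(len(l2))):
--         if l2[i] in l1_set:
--             # If l2[i] is in l1, store the current count for that element
--             right_count[l2[i]] = count
--         elif l2[i] not in l1_set:
--             # If l2[i] is not in l1, increment count
--             count += 1
--
--     # Sum the right counts for each element in l1
--     return sum(right_count[x] for x in l1_set)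
--
-- def n3_fitness(perm):
--     smaller = defaultdict(list)
--     larger = defaultdict(list)
--     for idx, n in enumerate(perm):
--         for i in range(idx+1, len(perm)):
--             if perm[i] < n:
--                 smaller[n].append(perm[i])
--             else:
--                 larger[n].append(perm[i])
--
--     out = 0
--     for s in list(smaller.keys()):
--         list1 = smaller[s]
--         for l in larger[s]:
--             if l in smaller:
--                 out += count_elements_to_right(list1, list(smaller[l]))
--     return out
-- ===== SOURCE B (Python) =====
-- def n3_fitness(perm):
--     n = len(perm)
--     out = 0
--     for i in range(n):
--         vi = perm[i]
--         for j in range(i + 1, n):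
--             vj = perm[j]
--             if vi < vj:
--                 ones = 0
--                 for t in range(j + 1, n):
--                     vt = perm[t]
--                     if vt < vi:
--                         ones += 1
--                     elif vt < vj:
--                         out += ones
--     return out
-- ===== Notes on version B (the rewrite author's own statement) =====
-- stated objective: simpler
-- what changed: A builds per-value smaller/larger defaultdict buckets and counts via a dict-and-set helper over bucket lists; B drops all the dictionaries and counts the 2413-pattern occurrences directly with three index loops, keeping one running counter ('ones') per (i,j) window.
-- outside the precondition, e.g. on n3_fitness([2, 1, 3, 3, 2, 1]): A returns 2, B returns 0; on n3_fitness([1, 2, 2, 0, 1, 1]): A returns 8, B returns 4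
import Mathlib
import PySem

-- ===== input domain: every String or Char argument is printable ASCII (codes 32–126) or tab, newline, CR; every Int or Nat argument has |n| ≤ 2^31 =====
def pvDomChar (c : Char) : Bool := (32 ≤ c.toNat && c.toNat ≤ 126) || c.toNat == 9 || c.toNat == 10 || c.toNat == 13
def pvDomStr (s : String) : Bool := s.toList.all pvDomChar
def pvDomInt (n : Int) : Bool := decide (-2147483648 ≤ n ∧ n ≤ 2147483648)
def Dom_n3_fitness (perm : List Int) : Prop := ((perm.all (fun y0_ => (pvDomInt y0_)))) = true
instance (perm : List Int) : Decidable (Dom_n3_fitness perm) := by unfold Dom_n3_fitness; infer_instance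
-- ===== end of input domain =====

-- B replaces A's per-value defaultdict buckets and dict/set helper by a direct three-loop count of the
-- 2413 pattern with one running counter per window (objective: simpler, same O(n^3)).


-- ===== PORT A =====
-- count_elements_to_right(l1, l2): dict of zeros over set(l1), then a right-to-left pass over l2.
def cetr (l1 l2 : List Int) : Int :=
  let l1set : PySem.Set Int := PySem.Set.ofList l1
  let right_count : PySem.Dict Int Int :=
    l1set.foldl (fun d x => d.insert x 0) PySem.Dict.empty
  let st :=
    ((PySem.List.pyRange 0 (PySem.List.len l2)).reverse).foldl
      (fun (st : PySem.Dict Int Int × Int) i =>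
        if PySem.Set.contains l1set (PySem.List.pyGetD l2 i 0) then
          (st.1.insert (PySem.List.pyGetD l2 i 0) st.2, st.2)
        else if ¬ PySem.Set.contains l1set (PySem.List.pyGetD l2 i 0) then
          (st.1, st.2 + 1)
        else st)
      (right_count, 0)
  (l1set.map (fun x => st.1.getD x 0)).sum

def n3_fitness (perm : List Int) : Int :=
  let sl :=
    (PySem.List.enumerate perm).foldl
      (fun (sl : PySem.Dict Int (List Int) × PySem.Dict Int (List Int)) p =>
        (PySem.List.pyRange (p.1 + 1) (PySem.List.len perm)).foldl
          (fun (sl : PySem.Dict Int (List Int) × PySem.Dict Int (List Int)) i =>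
            if PySem.List.pyGetD perm i 0 < p.2 then
              (sl.1.modify p.2 [] (fun xs => xs ++ [PySem.List.pyGetD perm i 0]), sl.2)
            else
              (sl.1, sl.2.modify p.2 [] (fun xs => xs ++ [PySem.List.pyGetD perm i 0])))
          sl)
      (PySem.Dict.empty, PySem.Dict.empty)
  let smaller := sl.1
  let larger := sl.2
  smaller.keys.foldl
    (fun out s =>
      (larger.getD s []).foldl
        (fun out l =>
          if smaller.contains l then out + cetr (smaller.getD s []) (smaller.getD l []) else out)
        out)
    0

-- ===== PORT B =====
def n3_fitness_alt (perm : List Int) : Int :=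
  let n := PySem.List.len perm
  (PySem.List.pyRange 0 n).foldl
    (fun out i =>
      (PySem.List.pyRange (i + 1) n).foldl
        (fun out j =>
          if PySem.List.pyGetD perm i 0 < PySem.List.pyGetD perm j 0 then
            ((PySem.List.pyRange (j + 1) n).foldl
              (fun (st : Int × Int) t =>
                if PySem.List.pyGetD perm t 0 < PySem.List.pyGetD perm i 0 then
                  (st.1 + 1, st.2)
                else if PySem.List.pyGetD perm t 0 < PySem.List.pyGetD perm j 0 then
                  (st.1, st.2 + st.1)
                else st)
              (0, out)).2
          else out)
        out)
    0

-- ===== PRECONDITION & SPEC =====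
-- Pre_ excludes lists with repeated values (A's argument is a permutation): on such lists A's value-keyed
-- defaultdict merges the buckets of equal values and the returned count is an accident of that keying,
-- while B counts strict-order pattern occurrences.
def Pre_n3_fitness (perm : List Int) : Prop := perm.Nodup
instance (perm : List Int) : Decidable (Pre_n3_fitness perm) := by unfold Pre_n3_fitness; infer_instance
def pvWitness_n3_fitness : List Int := [1, 3, 0, 2]

def Spec_n3_fitness (perm : List Int) (out : Int) : Prop := out = n3_fitness_alt perm
instance (perm : List Int) (out : Int) : Decidable (Spec_n3_fitness perm out) := by unfold Spec_n3_fitness; infer_instance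

-- ===== CLAIM (what is proved, stated in full; the proofs are below) =====
def Claim_equal_n3_fitness : Prop := ∀ (perm : List Int), Dom_n3_fitness perm → Pre_n3_fitness perm → Spec_n3_fitness perm (n3_fitness perm)

-- ===== LEMMAS AND PROOFS =====

def hMf (a b : Int) : List Int → Int
  | [] => 0
  | x :: w => (if x < a then ((w.countP (fun y => !decide (y < a) && decide (y < b))) : Int) else 0) + hMf a b w

def gMf (a : Int) : List Int → Int
  | [] => 0
  | b :: w => (if a < b then hMf a b w else 0) + gMf a w

def MMf : List Int → Int
  | [] => 0
  | a :: u => gMf a u + MMf u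

def smF (p : List Int) (v : Int) : List Int :=
  (p.drop (p.idxOf v + 1)).filter (fun y => decide (y < v))

def lgF (p : List Int) (v : Int) : List Int :=
  (p.drop (p.idxOf v + 1)).filter (fun y => !decide (y < v))

def cRecf (l1 : List Int) : List Int → Int
  | [] => 0
  | x :: t => (if x ∈ l1 then ((t.countP (fun y => decide (y ∉ l1))) : Int) else 0) + cRecf l1 t

def cetrStep (l1set : PySem.Set Int) (st : PySem.Dict Int Int × Int) (v : Int) : PySem.Dict Int Int × Int :=
  if PySem.Set.contains l1set v then (st.1.insert v st.2, st.2)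
  else if ¬ PySem.Set.contains l1set v then (st.1, st.2 + 1)
  else st

def cetrLoop (l1set : PySem.Set Int) (d0 : PySem.Dict Int Int) (l2 : List Int) : PySem.Dict Int Int × Int :=
  l2.reverse.foldl (cetrStep l1set) (d0, 0)

def appF (c : Int) (d : PySem.Dict Int (List Int)) (xs : List Int) : PySem.Dict Int (List Int) :=
  xs.foldl (fun d x => d.modify c [] (fun v => v ++ [x])) d

lemma B_inner (a b : Int) (w : List Int) : ∀ (h o : Int),
  w.foldl (fun (st : Int × Int) x => if x < a then (st.1+1, st.2) else if x < b then (st.1, st.2 + st.1) else st) (h, o)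
  = (h + (w.countP (fun x => decide (x < a)) : Int),
     o + h * (w.countP (fun y => !decide (y < a) && decide (y < b)) : Int) + hMf a b w) := by
  induction w with
  | nil => intro h o; simp [hMf]
  | cons x w ih =>
    intro h o
    by_cases hxa : x < a
    · simp only [List.foldl_cons, if_pos hxa, ih, hMf, List.countP_cons]
      simp only [Prod.ext_iff]
      constructor
      · simp [hxa]; ring
      · simp [hxa]; ring
    · by_cases hxb : x < b
      · simp only [List.foldl_cons, if_neg hxa, if_pos hxb, ih, hMf, List.countP_cons]
        simp only [Prod.ext_iff]
        constructor
        · simp [hxa]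
        · simp [hxa, hxb]; ring
      · simp only [List.foldl_cons, if_neg hxa, if_neg hxb, ih, hMf, List.countP_cons]
        simp [hxa, hxb]

lemma B_mid (p : List Int) (a : Int) : ∀ (fuel k : Nat), p.length ≤ k + fuel → ∀ (out : Int),
  (PySem.List.pyRange (k : Int) ((p.length : Int))).foldl
    (fun out j =>
      if a < PySem.List.pyGetD p j 0 then
        ((PySem.List.pyRange (j + 1) ((p.length : Int))).foldl
          (fun (st : Int × Int) t =>
            if PySem.List.pyGetD p t 0 < a then (st.1 + 1, st.2)
            else if PySem.List.pyGetD p t 0 < PySem.List.pyGetD p j 0 then (st.1, st.2 + st.1)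
            else st)
          (0, out)).2
      else out)
    out
  = out + gMf a (p.drop k) := by
  intro fuel
  induction fuel with
  | zero =>
    intro k hk out
    rw [List.drop_eq_nil_of_le (by omega), PySem.List.pyRange_one_eq_nil (by exact_mod_cast hk)]
    simp [gMf]
  | succ fuel ih =>
    intro k hk out
    by_cases hkl : k < p.length
    · rw [PySem.List.pyRange_one_cons (by exact_mod_cast hkl)]
      simp only [List.foldl_cons]
      have hdrop : p.drop k = p[k] :: p.drop (k + 1) := List.drop_eq_getElem_cons hkl
      have hget : PySem.List.pyGetD p (k : Int) 0 = p[k] := by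
        rw [PySem.List.pyGetD_eq_getElem p 0 (by positivity) (by exact_mod_cast hkl)]
        simp
      have hcast : ((k : Int) + 1) = ((k + 1 : Nat) : Int) := by push_cast; ring
      by_cases ha : a < p[k]
      · rw [if_pos (by rw [hget]; exact ha)]
        have hlen : ((p.length : Int)) = PySem.List.len p := by simp [PySem.List.len_eq]
        rw [hlen, PySem.List.foldl_pyRange_pyGetD p 0
          (fun (st : Int × Int) v => if v < a then (st.1 + 1, st.2)
            else if v < PySem.List.pyGetD p (k:Int) 0 then (st.1, st.2 + st.1) else st)
          (0, out) (by positivity)]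
        rw [B_inner]
        have htn : ((k : Int) + 1).toNat = k + 1 := by omega
        rw [htn, ← hlen, hcast, ih (k+1) (by omega)]
        rw [hdrop, gMf, if_pos ha, hget]
        ring
      · rw [if_neg (by rw [hget]; exact ha)]
        rw [hcast, ih (k+1) (by omega)]
        rw [hdrop, gMf, if_neg ha]
        ring
    · rw [List.drop_eq_nil_of_le (by omega),
        PySem.List.pyRange_one_eq_nil (by exact_mod_cast (by omega : p.length ≤ k))]
      simp [gMf]

lemma B_outer (p : List Int) : ∀ (fuel k : Nat), p.length ≤ k + fuel → ∀ (out : Int),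
  (PySem.List.pyRange (k : Int) ((p.length : Int))).foldl
    (fun out i =>
      (PySem.List.pyRange (i + 1) ((p.length : Int))).foldl
        (fun out j =>
          if PySem.List.pyGetD p i 0 < PySem.List.pyGetD p j 0 then
            ((PySem.List.pyRange (j + 1) ((p.length : Int))).foldl
              (fun (st : Int × Int) t =>
                if PySem.List.pyGetD p t 0 < PySem.List.pyGetD p i 0 then (st.1 + 1, st.2)
                else if PySem.List.pyGetD p t 0 < PySem.List.pyGetD p j 0 then (st.1, st.2 + st.1)
                else st)
              (0, out)).2
          else out)
        out)
    out
  = out + MMf (p.drop k) := by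
  intro fuel
  induction fuel with
  | zero =>
    intro k hk out
    rw [List.drop_eq_nil_of_le (by omega), PySem.List.pyRange_one_eq_nil (by exact_mod_cast hk)]
    simp [MMf]
  | succ fuel ih =>
    intro k hk out
    by_cases hkl : k < p.length
    · rw [PySem.List.pyRange_one_cons (by exact_mod_cast hkl)]
      simp only [List.foldl_cons]
      have hdrop : p.drop k = p[k] :: p.drop (k + 1) := List.drop_eq_getElem_cons hkl
      have hcast : ((k : Int) + 1) = ((k + 1 : Nat) : Int) := by push_cast; ring
      rw [hcast, B_mid p (PySem.List.pyGetD p (k : Int) 0) (fuel + 1) (k + 1) (by omega)]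
      rw [ih (k+1) (by omega)]
      have hget : PySem.List.pyGetD p (k : Int) 0 = p[k] := by
        rw [PySem.List.pyGetD_eq_getElem p 0 (by positivity) (by exact_mod_cast hkl)]
        simp
      rw [hdrop, MMf, hget]
      ring
    · rw [List.drop_eq_nil_of_le (by omega),
        PySem.List.pyRange_one_eq_nil (by exact_mod_cast (by omega : p.length ≤ k))]
      simp [MMf]

lemma B_eq_MMf (p : List Int) : n3_fitness_alt p = MMf p := by
  unfold n3_fitness_alt
  simp only [PySem.List.len_eq]
  have h := B_outer p p.length 0 (by omega) 0
  rw [show (((0 : Nat) : Int)) = (0 : Int) from rfl] at h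
  rw [List.drop_zero] at h
  rw [h]
  ring

lemma cetrLoop_cons (l1set : PySem.Set Int) (d0 : PySem.Dict Int Int) (x : Int) (t : List Int) :
    cetrLoop l1set d0 (x :: t) = cetrStep l1set (cetrLoop l1set d0 t) x := by
  simp [cetrLoop, List.reverse_cons, List.foldl_append]

lemma loop_count (l1set : PySem.Set Int) (d0 : PySem.Dict Int Int) (t : List Int) :
    (cetrLoop l1set d0 t).2 = ((t.countP (fun y => !PySem.Set.contains l1set y)) : Int) := by
  induction t with
  | nil => simp [cetrLoop]
  | cons x t ih =>
    rw [cetrLoop_cons, List.countP_cons]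
    by_cases h : x ∈ l1set
    · simp [cetrStep, h, ih]
    · simp [cetrStep, h, ih]

lemma zeros_getD (xs : List Int) : ∀ (d : PySem.Dict Int Int), (∀ w, d.getD w 0 = 0) →
    ∀ v, (xs.foldl (fun d x => d.insert x 0) d).getD v 0 = 0 := by
  induction xs with
  | nil => intro d hd v; exact hd v
  | cons x t ih =>
    intro d hd v
    simp only [List.foldl_cons]
    apply ih
    intro w
    by_cases hw : w = x
    · subst hw; rw [PySem.Dict.getD_insert_self]
    · rw [PySem.Dict.getD_insert_of_ne _ _ _ hw]; exact hd w

lemma loop_getD_notmem (l1set : PySem.Set Int) (d0 : PySem.Dict Int Int)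
    (hd0 : ∀ w, d0.getD w 0 = 0) (t : List Int) :
    ∀ v, v ∉ t → (cetrLoop l1set d0 t).1.getD v 0 = 0 := by
  induction t with
  | nil => intro v _; exact hd0 v
  | cons x t ih =>
    intro v hv
    rw [cetrLoop_cons]
    have hvx : v ≠ x := fun h => hv (h ▸ List.mem_cons_self)
    have hvt : v ∉ t := fun h => hv (List.mem_cons_of_mem _ h)
    by_cases h : x ∈ l1set
    · have hc : PySem.Set.contains l1set x = true := by simp [h]
      simp only [cetrStep, if_pos hc]
      rw [PySem.Dict.getD_insert_of_ne _ _ _ hvx]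
      exact ih v hvt
    · simp [cetrStep, h]
      exact ih v hvt

lemma sum_getD_insert (L : List Int) (hL : L.Nodup) (d : PySem.Dict Int Int) (x c : Int) (hx : x ∈ L) :
    (L.map (fun v => (d.insert x c).getD v 0)).sum
      = (L.map (fun v => d.getD v 0)).sum - d.getD x 0 + c := by
  induction L with
  | nil => cases hx
  | cons y t ih =>
    rcases List.mem_cons.1 hx with h | h
    · subst h
      have hyt : x ∉ t := (List.nodup_cons.1 hL).1
      simp only [List.map_cons, List.sum_cons, PySem.Dict.getD_insert_self]
      have : t.map (fun v => (d.insert x c).getD v 0) = t.map (fun v => d.getD v 0) := by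
        apply List.map_congr_left
        intro v hv
        exact PySem.Dict.getD_insert_of_ne _ _ _ (fun he => hyt (he ▸ hv))
      rw [this]; ring
    · have hyx : y ≠ x := fun he => (List.nodup_cons.1 hL).1 (he ▸ h)
      simp only [List.map_cons, List.sum_cons]
      rw [PySem.Dict.getD_insert_of_ne _ _ _ hyx, ih (List.nodup_cons.1 hL).2 h]
      ring

lemma sum_getD_loop (l1 : List Int) (h1 : l1.Nodup) (d0 : PySem.Dict Int Int)
    (hd0 : ∀ w, d0.getD w 0 = 0) :
    ∀ (l2 : List Int), l2.Nodup →
      ((l1.map (fun v => (cetrLoop (PySem.Set.ofList l1) d0 l2).1.getD v 0)).sum) = cRecf l1 l2 := by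
  intro l2
  induction l2 with
  | nil =>
    intro _
    simp only [cetrLoop, List.reverse_nil, List.foldl_nil, cRecf]
    rw [List.map_congr_left (fun v _ => hd0 v)]
    simp
  | cons x t ih =>
    intro h2
    have hxt : x ∉ t := (List.nodup_cons.1 h2).1
    have ht : t.Nodup := (List.nodup_cons.1 h2).2
    rw [cetrLoop_cons]
    by_cases hx : x ∈ l1
    · have hc : PySem.Set.contains (PySem.Set.ofList l1) x = true := by
        simp [PySem.Set.mem_ofList, hx]
      simp only [cetrStep, if_pos hc]
      rw [sum_getD_insert l1 h1 _ x _ hx]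
      rw [loop_count, loop_getD_notmem _ _ hd0 _ x hxt, ih ht]
      have hcnt : t.countP (fun y => !PySem.Set.contains (PySem.Set.ofList l1) y)
          = t.countP (fun y => decide (y ∉ l1)) := by
        apply List.countP_congr
        intro y _
        simp [PySem.Set.mem_ofList]
      rw [hcnt]
      simp [cRecf, hx]
      ring
    · have hc : PySem.Set.contains (PySem.Set.ofList l1) x = false := by
        simp [PySem.Set.mem_ofList, hx]
      simp only [cetrStep, hc, Bool.false_eq_true, if_false, not_false_iff, if_true]
      simp only [cRecf, if_neg hx]
      rw [← ih ht]
      simp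

lemma foldrev {St : Type} (l2 : List Int) (g : St → Int → St) (init : St) :
    ((PySem.List.pyRange 0 (PySem.List.len l2)).reverse).foldl
        (fun st i => g st (PySem.List.pyGetD l2 i 0)) init
      = l2.reverse.foldl g init := by
  conv_rhs => rw [← PySem.List.map_pyGetD_pyRange_zero l2 (0 : Int)]
  rw [← List.map_reverse, List.foldl_map]

lemma cetr_eq (l1 l2 : List Int) (h1 : l1.Nodup) (h2 : l2.Nodup) :
    cetr l1 l2 = cRecf l1 l2 := by
  unfold cetr
  simp only []
  rw [PySem.Set.ofList_eq_self_of_nodup l1 h1]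
  have hd0 : ∀ w, ((l1 : PySem.Set Int).foldl (fun d x => d.insert x 0)
      (PySem.Dict.empty : PySem.Dict Int Int)).getD w 0 = 0 :=
    zeros_getD _ _ (fun w => PySem.Dict.getD_empty w 0)
  rw [show (fun (st : PySem.Dict Int Int × Int) (i : Int) =>
        if PySem.Set.contains (l1 : PySem.Set Int) (PySem.List.pyGetD l2 i 0) then
          (st.1.insert (PySem.List.pyGetD l2 i 0) st.2, st.2)
        else if ¬ PySem.Set.contains (l1 : PySem.Set Int) (PySem.List.pyGetD l2 i 0) then
          (st.1, st.2 + 1)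
        else st)
      = (fun (st : PySem.Dict Int Int × Int) (i : Int) =>
          cetrStep (l1 : PySem.Set Int) st (PySem.List.pyGetD l2 i 0)) from rfl]
  rw [foldrev l2 (cetrStep (l1 : PySem.Set Int)) _]
  have hfin := sum_getD_loop l1 h1 _ hd0 l2 h2
  rw [PySem.Set.ofList_eq_self_of_nodup l1 h1] at hfin
  exact hfin

lemma appF_getD_self (c : Int) (d : PySem.Dict Int (List Int)) (xs : List Int) :
    (appF c d xs).getD c [] = d.getD c [] ++ xs := by
  unfold appF
  rw [show xs.foldl (fun d x => d.modify c [] (fun v => v ++ [x])) d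
      = (xs.map (fun x => (c, x))).foldl (fun d p => d.modify p.1 [] (fun v => v ++ [p.2])) d from
    by rw [List.foldl_map]]
  rw [PySem.Dict.getD_foldl_modify_append]
  congr 1
  rw [List.filter_eq_self.mpr (by intro p hp; rcases List.mem_map.1 hp with ⟨x, _, rfl⟩; simp)]
  simp

lemma appF_getD_ne (c v : Int) (hvc : v ≠ c) (xs : List Int) :
    ∀ (d : PySem.Dict Int (List Int)), (appF c d xs).getD v [] = d.getD v [] := by
  induction xs with
  | nil => intro d; rfl
  | cons x t ih =>
    intro d
    unfold appF
    simp only [List.foldl_cons]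
    rw [show (t.foldl (fun d x => d.modify c [] (fun v => v ++ [x]))
        (d.modify c [] (fun v => v ++ [x]))) = appF c (d.modify c [] (fun v => v ++ [x])) t from rfl]
    rw [ih]
    exact PySem.Dict.getD_modify_of_ne d [] _ hvc

lemma appF_contains_ne (c v : Int) (hvc : v ≠ c) (xs : List Int) :
    ∀ (d : PySem.Dict Int (List Int)), (appF c d xs).contains v = d.contains v := by
  induction xs with
  | nil => intro d; rfl
  | cons x t ih =>
    intro d
    unfold appF
    simp only [List.foldl_cons]
    rw [show (t.foldl (fun d x => d.modify c [] (fun v => v ++ [x]))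
        (d.modify c [] (fun v => v ++ [x]))) = appF c (d.modify c [] (fun v => v ++ [x])) t from rfl]
    rw [ih]
    rw [PySem.Dict.contains_modify]
    simp [hvc]

lemma set_update_const (c : Int) (xs : List Int) :
    ∀ (s : PySem.Set Int), PySem.Set.update s (xs.map (fun _ => c))
      = if xs.isEmpty then s else PySem.Set.add s c := by
  induction xs with
  | nil => intro s; rfl
  | cons x t ih =>
    intro s
    simp only [List.map_cons, List.isEmpty_cons]
    rw [show PySem.Set.update s (c :: t.map (fun _ => c))
        = PySem.Set.update (PySem.Set.add s c) (t.map (fun _ => c)) from rfl]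
    rw [ih]
    by_cases ht : t.isEmpty
    · simp [ht]
    · simp only [ht]
      rw [PySem.Set.add_of_mem (PySem.Set.mem_add s c c |>.2 (Or.inr rfl))]
      simp

lemma appF_keys (c : Int) (d : PySem.Dict Int (List Int)) (xs : List Int) :
    (appF c d xs).keys = if xs.isEmpty then d.keys else PySem.Set.add d.keys c := by
  unfold appF
  rw [show (fun (d : PySem.Dict Int (List Int)) (x : Int) => d.modify c [] (fun v => v ++ [x]))
      = (fun (d : PySem.Dict Int (List Int)) (x : Int) =>
          d.modify ((fun (_ : Int) => c) x) [] ((fun (_ : PySem.Dict Int (List Int)) (x : Int) => (fun v => v ++ [x])) d x)) from rfl]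
  rw [PySem.Dict.keys_foldl_modify_key xs (fun _ => c) [] _ d]
  exact set_update_const c xs d.keys

lemma smF_head (a : Int) (u : List Int) : smF (a :: u) a = u.filter (fun y => decide (y < a)) := by
  simp [smF]

lemma lgF_head (a : Int) (u : List Int) : lgF (a :: u) a = u.filter (fun y => !decide (y < a)) := by
  simp [lgF]

lemma smF_tail (a v : Int) (hva : v ≠ a) (u : List Int) : smF (a :: u) v = smF u v := by
  simp [smF, List.idxOf_cons_ne _ (by exact fun h => hva h.symm)]

lemma lgF_tail (a v : Int) (hva : v ≠ a) (u : List Int) : lgF (a :: u) v = lgF u v := by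
  simp [lgF, List.idxOf_cons_ne _ (by exact fun h => hva h.symm)]

lemma smF_not_mem (p : List Int) (v : Int) (h : v ∉ p) : smF p v = [] := by
  unfold smF
  rw [List.drop_eq_nil_of_le (by rw [List.idxOf_eq_length h]; omega)]
  rfl

lemma lgF_not_mem (p : List Int) (v : Int) (h : v ∉ p) : lgF p v = [] := by
  unfold lgF
  rw [List.drop_eq_nil_of_le (by rw [List.idxOf_eq_length h]; omega)]
  rfl

lemma smF_nodup (p : List Int) (hnd : p.Nodup) (v : Int) : (smF p v).Nodup :=
  (List.Sublist.trans List.filter_sublist (List.drop_sublist _ _)).nodup hnd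

lemma pair_split (c : Int) (xs : List Int) : ∀ (S L : PySem.Dict Int (List Int)),
    xs.foldl (fun sl x => if x < c then (sl.1.modify c [] (fun v => v ++ [x]), sl.2)
        else (sl.1, sl.2.modify c [] (fun v => v ++ [x]))) (S, L)
      = (appF c S (xs.filter (fun x => decide (x < c))), appF c L (xs.filter (fun x => !decide (x < c)))) := by
  induction xs with
  | nil => intro S L; rfl
  | cons x t ih =>
    intro S L
    simp only [List.foldl_cons, List.filter_cons]
    by_cases hx : x < c
    · simp only [if_pos hx, decide_eq_true hx, Bool.not_true, if_true]
      rw [ih]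
      rfl
    · simp only [if_neg hx, decide_eq_false hx, Bool.not_false, if_true]
      rw [ih]
      rfl

lemma build_char (p : List Int) : ∀ (u : List Int) (k : Nat) (S L : PySem.Dict Int (List Int)),
    u = p.drop k → u.Nodup → (∀ v ∈ u, S.contains v = false) →
    ((∀ v, ((PySem.List.enumerate u (k : Int)).foldl
        (fun sl pr => (appF pr.2 sl.1 ((p.drop (pr.1 + 1).toNat).filter (fun y => decide (y < pr.2))),
                       appF pr.2 sl.2 ((p.drop (pr.1 + 1).toNat).filter (fun y => !decide (y < pr.2)))))
        (S, L)).1.getD v [] = S.getD v [] ++ smF u v) ∧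
     (∀ v, ((PySem.List.enumerate u (k : Int)).foldl
        (fun sl pr => (appF pr.2 sl.1 ((p.drop (pr.1 + 1).toNat).filter (fun y => decide (y < pr.2))),
                       appF pr.2 sl.2 ((p.drop (pr.1 + 1).toNat).filter (fun y => !decide (y < pr.2)))))
        (S, L)).2.getD v [] = L.getD v [] ++ lgF u v) ∧
     (((PySem.List.enumerate u (k : Int)).foldl
        (fun sl pr => (appF pr.2 sl.1 ((p.drop (pr.1 + 1).toNat).filter (fun y => decide (y < pr.2))),
                       appF pr.2 sl.2 ((p.drop (pr.1 + 1).toNat).filter (fun y => !decide (y < pr.2)))))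
        (S, L)).1.keys = S.keys ++ u.filter (fun v => !(smF u v).isEmpty))) := by
  intro u
  induction u with
  | nil =>
    intro k S L hu hnd hfr
    refine ⟨?_, ?_, ?_⟩ <;> intros <;> simp [PySem.List.enumerate, smF, lgF]
  | cons x t ih =>
    intro k S L hu hnd hfr
    have hxt : x ∉ t := (List.nodup_cons.1 hnd).1
    have hndt : t.Nodup := (List.nodup_cons.1 hnd).2
    have hdropt : t = p.drop (k + 1) := by
      have : p.drop (k+1) = (p.drop k).drop 1 := by rw [List.drop_drop]
      rw [this, ← hu]
      rfl
    have htn : (((k : Nat) : Int) + 1).toNat = k + 1 := by omega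
    rw [PySem.List.enumerate_cons]
    simp only [List.foldl_cons, htn, ← hdropt]
    set ts := t.filter (fun y => decide (y < x)) with hts
    set tl := t.filter (fun y => !decide (y < x)) with htl
    have hcast : ((k : Int) + 1) = ((k + 1 : Nat) : Int) := by push_cast; ring
    have hfr' : ∀ v ∈ t, (appF x S ts).contains v = false := by
      intro v hv
      rw [appF_contains_ne x v (fun h => hxt (h ▸ hv)) ts]
      exact hfr v (List.mem_cons_of_mem _ hv)
    obtain ⟨IH1, IH2, IH3⟩ := ih (k+1) (appF x S ts) (appF x L tl) hdropt hndt hfr'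
    rw [hcast]
    refine ⟨?_, ?_, ?_⟩
    · intro v
      by_cases hv : v = x
      · subst hv
        rw [IH1 v, smF_not_mem t v hxt, smF_head, appF_getD_self]
        simp [hts]
      · rw [IH1 v, appF_getD_ne x v hv ts S, smF_tail x v hv t]
    · intro v
      by_cases hv : v = x
      · subst hv
        rw [IH2 v, lgF_not_mem t v hxt, lgF_head, appF_getD_self]
        simp [htl]
      · rw [IH2 v, appF_getD_ne x v hv tl L, lgF_tail x v hv t]
    · rw [IH3, appF_keys]
      have hxkeys : x ∉ S.keys := by
        intro hmem
        have := (PySem.Dict.contains_iff_mem_keys S x).2 hmem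
        rw [hfr x List.mem_cons_self] at this
        exact absurd this (by simp)
      have hfiltert : t.filter (fun v => !(smF t v).isEmpty)
          = t.filter (fun v => !(smF (x :: t) v).isEmpty) := by
        apply List.filter_congr
        intro v hv
        rw [smF_tail x v (fun h => hxt (h ▸ hv)) t]
      rw [hfiltert, List.filter_cons]
      by_cases hempty : ts.isEmpty
      · simp only [hempty, if_true]
        rw [smF_head]
        simp only [← hts, hempty]
        simp
      · simp only [hempty]
        rw [PySem.Set.add_of_not_mem hxkeys, smF_head]
        simp only [← hts]
        simp only [hempty]
        simp

lemma builder_eq (p : List Int) :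
    (PySem.List.enumerate p).foldl
      (fun (sl : PySem.Dict Int (List Int) × PySem.Dict Int (List Int)) pr =>
        (PySem.List.pyRange (pr.1 + 1) (PySem.List.len p)).foldl
          (fun (sl : PySem.Dict Int (List Int) × PySem.Dict Int (List Int)) i =>
            if PySem.List.pyGetD p i 0 < pr.2 then
              (sl.1.modify pr.2 [] (fun xs => xs ++ [PySem.List.pyGetD p i 0]), sl.2)
            else
              (sl.1, sl.2.modify pr.2 [] (fun xs => xs ++ [PySem.List.pyGetD p i 0])))
          sl)
      (PySem.Dict.empty, PySem.Dict.empty)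
    = (PySem.List.enumerate p ((0 : Nat) : Int)).foldl
      (fun sl pr => (appF pr.2 sl.1 ((p.drop (pr.1 + 1).toNat).filter (fun y => decide (y < pr.2))),
                     appF pr.2 sl.2 ((p.drop (pr.1 + 1).toNat).filter (fun y => !decide (y < pr.2)))))
      (PySem.Dict.empty, PySem.Dict.empty) := by
  rw [show (((0 : Nat) : Int)) = (0 : Int) from rfl]
  apply PySem.List.foldl_congr_mem
  intro sl pr hpr
  have hpr1 : 0 ≤ pr.1 := by
    rcases (PySem.List.mem_enumerate_iff p 0 pr).1 hpr with ⟨k, hk, rfl⟩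
    simp
  rw [PySem.List.foldl_pyRange_pyGetD p 0
    (fun (sl : PySem.Dict Int (List Int) × PySem.Dict Int (List Int)) x =>
      if x < pr.2 then (sl.1.modify pr.2 [] (fun xs => xs ++ [x]), sl.2)
      else (sl.1, sl.2.modify pr.2 [] (fun xs => xs ++ [x])))
    sl (by omega)]
  rw [pair_split]

def ASum (p : List Int) : Int :=
  ((p.filter (fun v => !(smF p v).isEmpty)).map (fun s =>
    ((lgF p s).map (fun l => if ¬(smF p l).isEmpty then cRecf (smF p s) (smF p l) else 0)).sum)).sum

lemma A_eq_ASum (p : List Int) (hnd : p.Nodup) : n3_fitness p = ASum p := by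
  unfold n3_fitness
  simp only []
  rw [builder_eq p]
  obtain ⟨H1, H2, H3⟩ := build_char p p 0 PySem.Dict.empty PySem.Dict.empty rfl hnd
    (fun v _ => PySem.Dict.contains_empty v)
  set r := (PySem.List.enumerate p ((0 : Nat) : Int)).foldl
      (fun sl pr => (appF pr.2 sl.1 ((p.drop (pr.1 + 1).toNat).filter (fun y => decide (y < pr.2))),
                     appF pr.2 sl.2 ((p.drop (pr.1 + 1).toNat).filter (fun y => !decide (y < pr.2)))))
      (PySem.Dict.empty, PySem.Dict.empty) with hr
  have hkeys : r.1.keys = p.filter (fun v => !(smF p v).isEmpty) := by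
    rw [H3]; rfl
  have hcont : ∀ l, r.1.contains l = true ↔ (l ∈ p ∧ ¬(smF p l).isEmpty) := by
    intro l
    rw [PySem.Dict.contains_iff_mem_keys, hkeys, List.mem_filter]
    simp
  have hgetD0 : ∀ v, PySem.Dict.getD (PySem.Dict.empty : PySem.Dict Int (List Int)) v [] = [] :=
    fun v => PySem.Dict.getD_empty v []
  -- turn the two folds into sums
  have step1 : ∀ (s : Int) (out : Int),
      (r.2.getD s []).foldl (fun out l =>
        if r.1.contains l then out + cetr (r.1.getD s []) (r.1.getD l []) else out) out
      = out + ((r.2.getD s []).map (fun l =>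
          if r.1.contains l then cetr (r.1.getD s []) (r.1.getD l []) else 0)).sum := by
    intro s out
    rw [PySem.List.foldl_congr_mem _ _
      (fun out l => out + (if r.1.contains l then cetr (r.1.getD s []) (r.1.getD l []) else 0)) out
      (by intro acc l _; by_cases h : r.1.contains l <;> simp [h])]
    rw [PySem.List.foldl_add]
  rw [PySem.List.foldl_congr_mem _ _
    (fun out s => out + ((r.2.getD s []).map (fun l =>
      if r.1.contains l then cetr (r.1.getD s []) (r.1.getD l []) else 0)).sum) 0
    (by intro acc s _; exact step1 s acc)]
  rw [PySem.List.foldl_add]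
  rw [hkeys]
  unfold ASum
  simp only [Int.zero_add]
  apply congrArg
  apply List.map_congr_left
  intro s hs
  have hsp : s ∈ p := (List.mem_filter.1 hs).1
  rw [H2 s, hgetD0 s]
  simp only [List.nil_append]
  apply congrArg
  apply List.map_congr_left
  intro l hl
  have hlp : l ∈ p := by
    have : l ∈ p.drop (p.idxOf s + 1) := (List.mem_filter.1 hl).1
    exact (List.drop_sublist _ _).mem this
  by_cases hc : ¬(smF p l).isEmpty
  · rw [if_pos ((hcont l).2 ⟨hlp, hc⟩), if_pos hc]
    rw [H1 s, H1 l, hgetD0 s, hgetD0 l]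
    simp only [List.nil_append]
    exact cetr_eq _ _ (smF_nodup p hnd s) (smF_nodup p hnd l)
  · rw [if_neg hc]
    rw [if_neg (fun hcc => hc ((hcont l).1 hcc).2)]

lemma hM_zero (a b : Int) (w : List Int) (h : ∀ x ∈ w, ¬ x < a) : hMf a b w = 0 := by
  induction w with
  | nil => rfl
  | cons x t ih =>
    rw [hMf, if_neg (h x List.mem_cons_self), ih (fun y hy => h y (List.mem_cons_of_mem _ hy))]
    ring

lemma gM_zero (a : Int) (u : List Int) (h : ∀ x ∈ u, ¬ x < a) : gMf a u = 0 := by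
  induction u with
  | nil => rfl
  | cons b w ih =>
    rw [gMf, ih (fun y hy => h y (List.mem_cons_of_mem _ hy))]
    by_cases hab : a < b
    · rw [if_pos hab, hM_zero a b w (fun y hy => h y (List.mem_cons_of_mem _ hy))]
      ring
    · rw [if_neg hab]
      ring

lemma cRec_filter (w : List Int) (l1 : List Int) (a b : Int) (hab : a < b)
    (hmem : ∀ y ∈ w, (y ∈ l1 ↔ y < a)) :
    cRecf l1 (w.filter (fun y => decide (y < b))) = hMf a b w := by
  induction w with
  | nil => rfl
  | cons y w ih =>
    have hmw : ∀ z ∈ w, (z ∈ l1 ↔ z < a) := fun z hz => hmem z (List.mem_cons_of_mem _ hz)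
    have ihw := ih hmw
    rw [List.filter_cons, hMf]
    by_cases hyb : y < b
    · simp only [decide_eq_true hyb, if_true]
      rw [cRecf, ihw]
      have hcnt : (w.filter (fun y => decide (y < b))).countP (fun z => decide (z ∉ l1))
          = w.countP (fun z => !decide (z < a) && decide (z < b)) := by
        rw [List.countP_filter]
        apply List.countP_congr
        intro z hz
        have := hmw z hz
        by_cases hza : z < a <;> by_cases hzb : z < b <;> simp [hza, hzb, this]
      rw [hcnt]
      by_cases hya : y < a
      · rw [if_pos ((hmem y List.mem_cons_self).2 hya), if_pos hya]
      · rw [if_neg (fun hy => hya ((hmem y List.mem_cons_self).1 hy)), if_neg hya]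
    · simp only [decide_eq_false hyb, Bool.false_eq_true, if_false]
      rw [ihw, if_neg (fun hya => hyb (lt_trans hya hab))]
      ring

lemma outsum (u : List Int) (l1 : List Int) (a : Int) (hnd : u.Nodup) (hau : a ∉ u)
    (hmem : ∀ y ∈ u, (y ∈ l1 ↔ y < a)) :
    ((u.filter (fun y => !decide (y < a))).map
      (fun l => if ¬(smF u l).isEmpty then cRecf l1 (smF u l) else 0)).sum = gMf a u := by
  induction u with
  | nil => rfl
  | cons b w ih =>
    have hndw : w.Nodup := (List.nodup_cons.1 hnd).2
    have hbw : b ∉ w := (List.nodup_cons.1 hnd).1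
    have haw : a ∉ w := fun h => hau (List.mem_cons_of_mem _ h)
    have hab' : a ≠ b := fun h => hau (h ▸ List.mem_cons_self)
    have hmw : ∀ z ∈ w, (z ∈ l1 ↔ z < a) := fun z hz => hmem z (List.mem_cons_of_mem _ hz)
    have htail : (w.filter (fun y => !decide (y < a))).map
          (fun l => if ¬(smF (b :: w) l).isEmpty then cRecf l1 (smF (b :: w) l) else 0)
        = (w.filter (fun y => !decide (y < a))).map
          (fun l => if ¬(smF w l).isEmpty then cRecf l1 (smF w l) else 0) := by
      apply List.map_congr_left
      intro l hl
      have hlw : l ∈ w := (List.mem_filter.1 hl).1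
      rw [smF_tail b l (fun h => hbw (h ▸ hlw)) w]
    rw [List.filter_cons, gMf, ← ih hndw haw hmw]
    by_cases hba : b < a
    · simp only [decide_eq_true hba, Bool.not_true, Bool.false_eq_true, if_false,
        if_neg (by omega : ¬ a < b)]
      rw [htail]
      ring
    · have hab : a < b := by omega
      simp only [decide_eq_false hba, Bool.not_false, if_true]
      rw [List.map_cons, List.sum_cons, htail, smF_head]
      have hhead : (if ¬(w.filter (fun y => decide (y < b))).isEmpty
            then cRecf l1 (w.filter (fun y => decide (y < b))) else 0) = hMf a b w := by
        by_cases hne : (w.filter (fun y => decide (y < b))).isEmpty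
        · rw [if_neg (by simpa using hne)]
          rw [hM_zero a b w]
          intro x hx hxa
          have : x ∈ w.filter (fun y => decide (y < b)) :=
            List.mem_filter.2 ⟨hx, decide_eq_true (lt_trans hxa hab)⟩
          rw [List.isEmpty_iff.1 hne] at this
          cases this
        · rw [if_pos hne, cRec_filter w l1 a b hab hmw]
      rw [hhead, if_pos hab]

lemma ASum_eq_MMf (p : List Int) (hnd : p.Nodup) : ASum p = MMf p := by
  induction p with
  | nil => rfl
  | cons a u ih =>
    have hndu : u.Nodup := (List.nodup_cons.1 hnd).2
    have hau : a ∉ u := (List.nodup_cons.1 hnd).1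
    unfold ASum MMf
    rw [List.filter_cons]
    have htailfix : u.filter (fun v => !(smF (a :: u) v).isEmpty)
        = u.filter (fun v => !(smF u v).isEmpty) := by
      apply List.filter_congr
      intro v hv
      rw [smF_tail a v (fun h => hau (h ▸ hv)) u]
    have hFfix : (u.filter (fun v => !(smF u v).isEmpty)).map (fun s =>
          ((lgF (a :: u) s).map (fun l =>
            if ¬(smF (a :: u) l).isEmpty then cRecf (smF (a :: u) s) (smF (a :: u) l) else 0)).sum)
        = (u.filter (fun v => !(smF u v).isEmpty)).map (fun s =>
          ((lgF u s).map (fun l =>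
            if ¬(smF u l).isEmpty then cRecf (smF u s) (smF u l) else 0)).sum) := by
      apply List.map_congr_left
      intro s hs
      have hsu : s ∈ u := (List.mem_filter.1 hs).1
      have hsa : s ≠ a := fun h => hau (h ▸ hsu)
      rw [smF_tail a s hsa u, lgF_tail a s hsa u]
      apply congrArg
      apply List.map_congr_left
      intro l hl
      have hlu : l ∈ u := by
        have : l ∈ u.drop (u.idxOf s + 1) := (List.mem_filter.1 hl).1
        exact (List.drop_sublist _ _).mem this
      have hla : l ≠ a := fun h => hau (h ▸ hlu)
      rw [smF_tail a l hla u]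
    have hhead : ((lgF (a :: u) a).map (fun l =>
          if ¬(smF (a :: u) l).isEmpty then cRecf (smF (a :: u) a) (smF (a :: u) l) else 0)).sum
        = gMf a u := by
      rw [lgF_head, smF_head]
      have : (u.filter (fun y => !decide (y < a))).map (fun l =>
            if ¬(smF (a :: u) l).isEmpty then cRecf (u.filter (fun y => decide (y < a))) (smF (a :: u) l) else 0)
          = (u.filter (fun y => !decide (y < a))).map (fun l =>
            if ¬(smF u l).isEmpty then cRecf (u.filter (fun y => decide (y < a))) (smF u l) else 0) := by
        apply List.map_congr_left
        intro l hl
        have hlu : l ∈ u := (List.mem_filter.1 hl).1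
        rw [smF_tail a l (fun h => hau (h ▸ hlu)) u]
      rw [this]
      exact outsum u (u.filter (fun y => decide (y < a))) a hndu hau
        (fun y hy => by
          constructor
          · intro hmem'
            exact of_decide_eq_true (List.mem_filter.1 hmem').2
          · intro hya
            exact List.mem_filter.2 ⟨hy, decide_eq_true hya⟩)
    by_cases hpa : (smF (a :: u) a).isEmpty
    · have hg0 : gMf a u = 0 := by
        apply gM_zero
        intro x hx hxa
        rw [smF_head] at hpa
        have : x ∈ u.filter (fun y => decide (y < a)) :=
          List.mem_filter.2 ⟨hx, decide_eq_true hxa⟩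
        rw [List.isEmpty_iff.1 hpa] at this
        cases this
      simp only [hpa, Bool.not_true, Bool.false_eq_true, if_false]
      have ihu := ih hndu
      unfold ASum at ihu
      rw [htailfix, hFfix, ihu, hg0]
      ring
    · have hcond : (!(smF (a :: u) a).isEmpty) = true := by simpa using hpa
      simp only [hcond, if_true]
      have ihu := ih hndu
      unfold ASum at ihu
      rw [List.map_cons, List.sum_cons, hhead, htailfix, hFfix, ihu]

-- ===== VERDICT (by name: the statement is the Claim_ definition above) =====
theorem n3_fitness_spec : Claim_equal_n3_fitness := by
  intro perm _ hpre
  have hnd : perm.Nodup := hpre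
  unfold Spec_n3_fitness
  rw [A_eq_ASum perm hnd, ASum_eq_MMf perm hnd, B_eq_MMf perm]
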